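-- pv_equiv track=rewrite | github.com/Tusenka/hackerrank | nails.py | _build_seq
-- ===== SOURCE A (Python) =====
-- M = 10 ** 9 + 7
--
-- def _build_seq(a:list):
--     a.sort()
--     if len(a)==2:
--         return a[1]-a[0]
--     _dp=[[M for _ in range(2)] for _ in range(len(a))]
--     _dp[1][1]=a[1]-a[0]
--     _dp[2][1]=a[2]-a[1]+_dp[1][1]
--     _dp[2][0]=_dp[1][1]
--
--     for i in range( 3, len(a)):
--         _dp[i][1]=min(_dp[i-1][1], _dp[i-1][0]) + (a[i]-a[i-1])
--         _dp[i][0]=_dp[i-1][1]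
--     return _dp[-1][1]
-- ===== SOURCE B (Python) =====
-- def _build_seq(a: list):
--     # Sorts `a` in place, like the original.
--     a.sort()
--     total = a[-1] - a[0]
--     # Complement view: A's min-cost DP equals the full span minus the maximum
--     # sum of skippable interior gaps, no two adjacent (classic house-robber scan
--     # over the gaps strictly between the first and the last gap).
--     inc = exc = 0
--     for i in range(2, len(a) - 1):
--         inc, exc = exc + (a[i] - a[i - 1]), max(inc, exc)
--     return total - max(inc, exc)
-- ===== Notes on version B (the rewrite author's own statement) =====
-- stated objective: alternative
-- what changed: B computes the complement: the full span a[-1]-a[0] minus the MAXIMUM sum of pairwise non-adjacent interior gaps (classic house-robber max scan with inc/exc states), instead of A's forward min-cost DP table over taken/skipped states; B has no len==2 special case, no M sentinel and no n x 2 table, which also removes A's per-element list allocation (constant-factor speedup).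
-- outside the precondition, e.g. on _build_seq([0]): A raises IndexError, B returns 0; on _build_seq([-1]): A raises IndexError, B returns 0; on _build_seq([]): A raises IndexError, B raises IndexError
import Mathlib
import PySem

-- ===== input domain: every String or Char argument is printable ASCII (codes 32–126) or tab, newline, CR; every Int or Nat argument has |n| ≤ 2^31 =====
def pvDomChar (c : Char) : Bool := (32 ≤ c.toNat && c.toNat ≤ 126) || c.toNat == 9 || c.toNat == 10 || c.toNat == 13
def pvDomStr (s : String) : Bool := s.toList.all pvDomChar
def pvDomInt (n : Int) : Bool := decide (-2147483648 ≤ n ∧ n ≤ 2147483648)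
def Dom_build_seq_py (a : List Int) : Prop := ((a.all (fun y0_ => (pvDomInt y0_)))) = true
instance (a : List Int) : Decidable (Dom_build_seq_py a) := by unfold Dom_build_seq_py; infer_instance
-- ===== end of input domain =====

-- B replaces A's min-cost DP table by the complement view: full span minus the maximum
-- house-robber sum of skippable interior gaps (alternative algorithm, same cost).
-- Both A and B sort the argument list in place in Python; the equivalence proved here is
-- about the return value (the Lean ports work on the sorted copy `s`).

-- ===== PORT A =====
-- the for-loop of A, one recursive step per iteration; dp indices are in range on every
-- admitted input, so Python's in-range dp[i-1] / dp[i] / a[i] are ported with getD (exact there)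
def buildA_loop (s : List Int) (dp : List (Int × Int)) (i k : Nat) : List (Int × Int) :=
  match k with
  | 0 => dp
  | k + 1 =>
    let prev := dp.getD (i - 1) (0, 0)
    buildA_loop s (dp.set i (prev.2, min prev.2 prev.1 + (s.getD i 0 - s.getD (i - 1) 0))) (i + 1) k

def build_seq_py (a : List Int) : Int :=
  let s := PySem.List.sorted a (fun x => x) false
  if s.length == 2 then s.getD 1 0 - s.getD 0 0
  else
    let M : Int := 10 ^ 9 + 7
    let n := s.length
    let dp0 : List (Int × Int) := List.replicate n (M, M)      -- [[M, M] for _ in range(len(a))]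
    let d11 := s.getD 1 0 - s.getD 0 0                         -- _dp[1][1] = a[1] - a[0]
    let dp1 := dp0.set 1 (M, d11)
    let dp2 := dp1.set 2 (d11, s.getD 2 0 - s.getD 1 0 + d11)  -- _dp[2][1]; _dp[2][0]
    let dpf := buildA_loop s dp2 3 (n - 3)
    (dpf.getD (n - 1) (0, 0)).2                                -- _dp[-1][1]  (n ≥ 3 here)

-- ===== PORT B =====
-- B's loop: inc/exc house-robber states over the interior gaps; indices are in range on
-- every admitted input, so a[i] / a[i-1] are ported with getD (exact there)
def robber_loop (s : List Int) (inc exc : Int) (i k : Nat) : Int × Int :=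
  match k with
  | 0 => (inc, exc)
  | k + 1 => robber_loop s (exc + (s.getD i 0 - s.getD (i - 1) 0)) (max inc exc) (i + 1) k

def build_seq_py_alt (a : List Int) : Int :=
  let s := PySem.List.sorted a (fun x => x) false
  let total := s.getD (s.length - 1) 0 - s.getD 0 0            -- a[-1] - a[0]  (s nonempty on Pre_)
  let p := robber_loop s 0 0 2 (s.length - 1 - 2)              -- for i in range(2, len(a)-1)
  total - max p.1 p.2

-- ===== PRECONDITION & SPEC =====
-- Python A raises IndexError (a[1] / _dp[1]) on lists of length 0 or 1; those are excluded.
def Pre_build_seq_py (a : List Int) : Prop := 2 ≤ a.length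
instance (a : List Int) : Decidable (Pre_build_seq_py a) := by unfold Pre_build_seq_py; infer_instance
def pvWitness_build_seq_py : List Int := ([3, 1, 7])

def Spec_build_seq_py (a : List Int) (out : Int) : Prop := out = build_seq_py_alt a
instance (a : List Int) (out : Int) : Decidable (Spec_build_seq_py a out) := by unfold Spec_build_seq_py; infer_instance

-- ===== CLAIM (what is proved, stated in full; the proofs are below) =====
def Claim_equal_build_seq_py : Prop := ∀ (a : List Int), Dom_build_seq_py a → Pre_build_seq_py a → Spec_build_seq_py a (build_seq_py a)

-- ===== LEMMAS AND PROOFS =====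

-- loop invariant: with T j = s[j]-s[0] and g j = s[j]-s[j-1], A's row dp[i-1] equals
-- (T(i-1) - (exc + g(i-1)), T(i-1) - max inc exc) where (inc, exc) is B's state about to
-- process gap i-1; then A's final dp[·][1] is the span minus B's final max.
lemma loopA_robber (s : List Int) :
    ∀ (k i : Nat) (dp : List (Int × Int)) (inc exc : Int),
      3 ≤ i → i + k ≤ dp.length →
      dp.getD (i - 1) (0, 0) =
        (s.getD (i - 1) 0 - s.getD 0 0 - (exc + (s.getD (i - 1) 0 - s.getD (i - 2) 0)),
         s.getD (i - 1) 0 - s.getD 0 0 - max inc exc) →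
      ((buildA_loop s dp i k).getD (i + k - 1) (0, 0)).2 =
        (s.getD (i + k - 1) 0 - s.getD 0 0) -
          max (robber_loop s inc exc (i - 1) k).1 (robber_loop s inc exc (i - 1) k).2 := by
  intro k
  induction k with
  | zero =>
    intro i dp inc exc _ _ hget
    simp only [List.getD] at hget
    simp [buildA_loop, robber_loop, hget]
  | succ k ih =>
    intro i dp inc exc hi hlen hget
    have hi' : i < dp.length := by omega
    have hstep :
        (dp.set i ((dp.getD (i - 1) (0, 0)).2,
            min (dp.getD (i - 1) (0, 0)).2 (dp.getD (i - 1) (0, 0)).1 +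
              (s.getD i 0 - s.getD (i - 1) 0))).getD ((i + 1) - 1) (0, 0) =
          (s.getD ((i + 1) - 1) 0 - s.getD 0 0 -
             (max inc exc + (s.getD ((i + 1) - 1) 0 - s.getD ((i + 1) - 2) 0)),
           s.getD ((i + 1) - 1) 0 - s.getD 0 0 -
             max (exc + (s.getD (i - 1) 0 - s.getD (i - 2) 0)) (max inc exc)) := by
      have h1 : (i + 1) - 1 = i := by omega
      have h2 : (i + 1) - 2 = i - 1 := by omega
      rw [h1, h2]
      simp only [List.getD] at hget ⊢
      simp only [List.getElem?_set_self hi', Option.getD_some, hget, Prod.mk.injEq]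
      refine ⟨by ring, by omega⟩
    have := ih (i + 1)
        (dp.set i ((dp.getD (i - 1) (0, 0)).2,
          min (dp.getD (i - 1) (0, 0)).2 (dp.getD (i - 1) (0, 0)).1 +
            (s.getD i 0 - s.getD (i - 1) 0)))
        (exc + (s.getD (i - 1) 0 - s.getD (i - 2) 0)) (max inc exc)
        (by omega) (by simpa using by omega) hstep
    have hidx : i + 1 + k - 1 = i + (k + 1) - 1 := by omega
    have hrb : robber_loop s inc exc (i - 1) (k + 1) =
        robber_loop s (exc + (s.getD (i - 1) 0 - s.getD (i - 2) 0)) (max inc exc) (i + 1 - 1) k := by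
      have h1 : (i - 1) + 1 = i + 1 - 1 := by omega
      have h2 : (i - 1) - 1 = i - 2 := by omega
      simp [robber_loop, h1, h2]
    rw [hrb]
    simpa [buildA_loop, hidx] using this

-- ===== VERDICT (by name: the statement is the Claim_ definition above) =====
theorem build_seq_py_spec : Claim_equal_build_seq_py := by
  intro a _hDom hPre
  unfold Spec_build_seq_py build_seq_py build_seq_py_alt
  set s := PySem.List.sorted a (fun x => x) false with hs
  have hslen : s.length = a.length := PySem.List.length_sorted ..
  by_cases h2 : s.length == 2
  · have h2' : s.length = 2 := by simpa using h2
    simp [h2', robber_loop]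
  · simp only [h2]
    have hn : 3 ≤ s.length := by
      have : s.length ≠ 2 := by simpa using h2
      unfold Pre_build_seq_py at hPre; omega
    set n := s.length with hn'
    set M : Int := 10 ^ 9 + 7 with hM
    set d11 := s.getD 1 0 - s.getD 0 0 with hd11
    set dp2 := ((List.replicate n (M, M)).set 1 (M, d11)).set 2 (d11, s.getD 2 0 - s.getD 1 0 + d11) with hdp2
    have hdp2len : dp2.length = n := by simp [hdp2]
    have hget2 : dp2.getD (3 - 1) (0, 0) =
        (s.getD (3 - 1) 0 - s.getD 0 0 - ((0 : Int) + (s.getD (3 - 1) 0 - s.getD (3 - 2) 0)),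
         s.getD (3 - 1) 0 - s.getD 0 0 - max (0 : Int) 0) := by
      have h2n : 2 < (((List.replicate n (M, M)).set 1 (M, d11))).length := by simpa using by omega
      simp only [hdp2, List.getD, List.getElem?_set_self h2n, Option.getD_some, Prod.mk.injEq]
      norm_num [hd11]
    have := loopA_robber s (n - 3) 3 dp2 0 0 (by omega) (by omega) hget2
    have hidx : 3 + (n - 3) - 1 = n - 1 := by omega
    have hcnt : n - 1 - 2 = n - 3 := by omega
    rw [hidx] at this
    simpa [hcnt] using this
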